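-- pv_equiv track=rewrite | github.com/keyshor/autonomous_car_verification | simulator/plot_trajectories.py | errorFunc
-- ===== SOURCE A (Python) =====
-- def errorFunc(observation, thresh):
--     mid = len(observation)//2
--     rightView = observation[0:mid]
--     leftView = observation[mid+1:]
--     numRight = sum([int(a > thresh) for a in rightView])
--     numLeft = sum([int(a > thresh) for a in leftView])
--     err = numLeft - numRight
--     return err
-- ===== SOURCE B (Python) =====
-- def errorFunc(observation, thresh):
--     mid = len(observation) // 2
--     err = 0
--     for i, a in enumerate(observation):
--         if i == mid:
--             continue
--         if a > thresh:
--             err += 1 if i > mid else -1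
--     return err
-- ===== Notes on version B (the rewrite author's own statement) =====
-- stated objective: alternative
-- what changed: Replaces the two slice-and-sum passes (build two sublists and two indicator lists, count above thresh on each half, then subtract) with a single enumerate loop maintaining one signed accumulator and skipping the middle index.
import Mathlib
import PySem

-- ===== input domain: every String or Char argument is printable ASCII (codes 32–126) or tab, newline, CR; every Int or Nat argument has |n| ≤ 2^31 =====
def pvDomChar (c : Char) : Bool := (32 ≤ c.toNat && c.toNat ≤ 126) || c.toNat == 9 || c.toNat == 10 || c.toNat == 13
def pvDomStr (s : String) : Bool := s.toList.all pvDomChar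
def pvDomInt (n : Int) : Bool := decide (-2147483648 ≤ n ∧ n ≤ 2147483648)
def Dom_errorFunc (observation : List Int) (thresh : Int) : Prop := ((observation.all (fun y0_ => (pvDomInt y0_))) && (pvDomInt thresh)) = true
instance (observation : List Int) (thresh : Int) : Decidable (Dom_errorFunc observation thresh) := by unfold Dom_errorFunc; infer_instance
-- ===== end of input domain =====

-- B fuses A's two slice-and-sum passes into a single enumerate loop with one signed accumulator (alternative decomposition, same cost).


-- ===== PORT A =====
def errorFunc (observation : List Int) (thresh : Int) : Int :=
  let mid := PySem.Int.floordiv (observation.length : Int) 2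
  let rightView := PySem.List.slice observation (some 0) (some mid)
  let leftView := PySem.List.slice observation (some (mid + 1)) none
  let numRight := (rightView.map (fun a => if a > thresh then (1 : Int) else 0)).sum
  let numLeft := (leftView.map (fun a => if a > thresh then (1 : Int) else 0)).sum
  let err := numLeft - numRight
  err

-- ===== PORT B =====
def errorFunc_alt (observation : List Int) (thresh : Int) : Int :=
  let mid := PySem.Int.floordiv (observation.length : Int) 2
  (PySem.List.enumerate observation 0).foldl
    (fun err ia =>
      if ia.1 = mid then err
      else if ia.2 > thresh then (if ia.1 > mid then err + 1 else err - 1)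
      else err)
    0

-- ===== PRECONDITION & SPEC =====
def Spec_errorFunc (observation : List Int) (thresh : Int) (out : Int) : Prop := out = errorFunc_alt observation thresh
instance (observation : List Int) (thresh : Int) (out : Int) : Decidable (Spec_errorFunc observation thresh out) := by unfold Spec_errorFunc; infer_instance

-- ===== CLAIM (what is proved, stated in full; the proofs are below) =====
def Claim_equal_errorFunc : Prop := ∀ (observation : List Int) (thresh : Int), Dom_errorFunc observation thresh → Spec_errorFunc observation thresh (errorFunc observation thresh)

-- ===== LEMMAS AND PROOFS =====

-- count of elements above thresh, as both ports compute it
def pvCnt (thresh : Int) (l : List Int) : Int :=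
  (l.map (fun a => if a > thresh then (1 : Int) else 0)).sum

lemma pvCnt_nil (thresh : Int) : pvCnt thresh [] = 0 := rfl

lemma pvCnt_cons (thresh a : Int) (l : List Int) :
    pvCnt thresh (a :: l) = (if a > thresh then (1 : Int) else 0) + pvCnt thresh l := by
  simp [pvCnt]

-- the single-pass loop of B, run from index j, splits at mid into the two counts A takes
lemma pv_loop (thresh mid : Int) (l : List Int) : ∀ (j acc : Int),
    (PySem.List.enumerate l j).foldl
      (fun err ia =>
        if ia.1 = mid then err
        else if ia.2 > thresh then (if ia.1 > mid then err + 1 else err - 1)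
        else err) acc
    = acc + pvCnt thresh (l.drop (mid - j + 1).toNat) - pvCnt thresh (l.take (mid - j).toNat) := by
  induction l with
  | nil => intro j acc; simp [PySem.List.enumerate_nil, pvCnt]
  | cons a rest ih =>
    intro j acc
    rw [PySem.List.enumerate_cons, List.foldl_cons]
    rcases lt_trichotomy j mid with h | h | h
    · have h1 : (mid - j).toNat = (mid - (j+1)).toNat + 1 := by omega
      have h2 : (mid - j + 1).toNat = (mid - (j+1) + 1).toNat + 1 := by omega
      rw [h1, h2]
      simp only [List.take_succ_cons, List.drop_succ_cons, pvCnt_cons]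
      rw [ih (j+1)]
      have hne : ¬ (j = mid) := by omega
      have hng : ¬ (j > mid) := by omega
      simp only [hne, hng, if_false]
      by_cases ha : a > thresh <;> simp only [ha, if_true, if_false] <;> ring
    · have h1 : (mid - j).toNat = 0 := by omega
      have h2 : (mid - j + 1).toNat = 1 := by omega
      rw [h1, h2]
      simp only [List.take_zero, List.drop_one, List.tail_cons, pvCnt_nil]
      rw [ih (j+1)]
      have h3 : (mid - (j+1) + 1).toNat = 0 := by omega
      have h4 : (mid - (j+1)).toNat = 0 := by omega
      rw [h3, h4]
      simp [h, pvCnt_nil]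
    · have h1 : (mid - j).toNat = 0 := by omega
      have h2 : (mid - j + 1).toNat = 0 := by omega
      rw [h1, h2]
      simp only [List.take_zero, List.drop_zero, pvCnt_nil, pvCnt_cons]
      rw [ih (j+1)]
      have h3 : (mid - (j+1) + 1).toNat = 0 := by omega
      have h4 : (mid - (j+1)).toNat = 0 := by omega
      rw [h3, h4]
      have hne : ¬ (j = mid) := by omega
      have hg : j > mid := h
      simp only [hne, hg, if_false, if_true, List.drop_zero, List.take_zero, pvCnt_nil]
      by_cases ha : a > thresh <;> simp only [ha, if_true, if_false] <;> ring

-- ===== VERDICT (by name: the statement is the Claim_ definition above) =====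
theorem errorFunc_spec : Claim_equal_errorFunc := by
  intro observation thresh _
  show errorFunc observation thresh = errorFunc_alt observation thresh
  simp only [errorFunc, errorFunc_alt]
  have h0 : 0 ≤ PySem.Int.floordiv (observation.length : Int) 2 := by
    rw [PySem.Int.floordiv_eq_ediv_of_pos (by omega)]; omega
  set mid := PySem.Int.floordiv (observation.length : Int) 2 with hm
  rw [pv_loop, PySem.List.slice_zero_start, PySem.List.slice_to _ h0,
      PySem.List.slice_from _ (by omega : (0:Int) ≤ mid + 1)]
  have e1 : mid - 0 + 1 = mid + 1 := by ring
  have e2 : mid - 0 = mid := by ring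
  rw [e1, e2]
  simp [pvCnt]
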